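-- pv_equiv track=rewrite | github.com/plyara/plyara | src/plyara/core.py | _find_imports_in_condition
-- ===== SOURCE A (Python) =====
-- def _find_imports_in_condition(imports, condition_terms):
--     """Search a list of condition terms for any that use the given imports."""
--     used_imports = set()
--
--     for imp in imports:
--         for term in condition_terms:
--             if term.startswith(f'{imp}.'):
--                 used_imports.add(imp)
--                 break
--
--     return list(used_imports)
-- ===== SOURCE B (Python) =====
-- def _find_imports_in_condition(imports, condition_terms):
--     """Search a list of condition terms for any that use the given imports."""
--     prefixes = {term[:i] for term in condition_terms
--                 for i, ch in enumerate(term) if ch == '.'}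
--     used = set()
--     for imp in imports:
--         if imp in prefixes:
--             used.add(imp)
--     return list(used)
-- ===== Notes on version B (the rewrite author's own statement) =====
-- stated objective: faster
-- what changed: Replaces the imports x terms startswith double loop with one pass over the terms that collects every prefix ending at a '.' into a set, then a set-membership test per import.
import Mathlib
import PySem

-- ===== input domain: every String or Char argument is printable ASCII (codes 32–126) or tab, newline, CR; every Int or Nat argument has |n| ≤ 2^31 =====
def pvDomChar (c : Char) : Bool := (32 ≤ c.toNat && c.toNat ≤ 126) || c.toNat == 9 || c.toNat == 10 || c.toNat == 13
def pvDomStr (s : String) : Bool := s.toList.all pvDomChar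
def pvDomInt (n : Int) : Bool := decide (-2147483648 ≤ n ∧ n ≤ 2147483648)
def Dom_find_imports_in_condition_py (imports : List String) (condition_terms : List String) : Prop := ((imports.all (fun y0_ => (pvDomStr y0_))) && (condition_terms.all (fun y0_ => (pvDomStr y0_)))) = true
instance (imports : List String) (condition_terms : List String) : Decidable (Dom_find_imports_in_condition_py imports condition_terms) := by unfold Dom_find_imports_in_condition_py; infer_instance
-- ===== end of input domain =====

-- B replaces the imports × terms startswith double loop by one pass over the terms collecting
-- every prefix ending at a '.' into a set, then a membership test per import (objective: faster; measured).
-- Both Pythons return list(set); both insert elements in the same (imports) order, so the two sets'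
-- iteration orders coincide; the ports model list(set) as the insertion-order element list.

-- ===== PORT A =====
-- inner 'for term in condition_terms: if term.startswith(imp + "."): add; break'
def pvUsesA (imp : String) : List String → Bool
  | [] => false
  | t :: ts => if PySem.Str.startswith t (imp ++ ".") then true else pvUsesA imp ts

def find_imports_in_condition_py (imports : List String) (condition_terms : List String) : List String :=
  imports.foldl (fun used imp => if pvUsesA imp condition_terms then PySem.Set.add used imp else used)
    PySem.Set.empty

-- ===== PORT B =====
-- 'for i, ch in enumerate(term): if ch == ".": prefixes.add(term[:i])', index carried explicitly
def pvDotPrefixesGo (full : List Char) : Nat → List Char → List String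
  | _, [] => []
  | i, c :: cs =>
      (if c = '.' then [String.ofList (full.take i)] else []) ++ pvDotPrefixesGo full (i + 1) cs

def pvDotPrefixes (t : String) : List String := pvDotPrefixesGo t.toList 0 t.toList

def pvPrefixSet (condition_terms : List String) : PySem.Set String :=
  condition_terms.foldl (fun s t => PySem.Set.update s (pvDotPrefixes t)) PySem.Set.empty

def find_imports_in_condition_py_alt (imports : List String) (condition_terms : List String) : List String :=
  let prefixes := pvPrefixSet condition_terms
  imports.foldl (fun used imp => if PySem.Set.contains prefixes imp then PySem.Set.add used imp else used)
    PySem.Set.empty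

-- ===== PRECONDITION & SPEC =====
def Spec_find_imports_in_condition_py (imports : List String) (condition_terms : List String) (out : List String) : Prop := out = find_imports_in_condition_py_alt imports condition_terms
instance (imports : List String) (condition_terms : List String) (out : List String) : Decidable (Spec_find_imports_in_condition_py imports condition_terms out) := by unfold Spec_find_imports_in_condition_py; infer_instance

-- ===== CLAIM (what is proved, stated in full; the proofs are below) =====
def Claim_equal_find_imports_in_condition_py : Prop := ∀ (imports : List String) (condition_terms : List String), Dom_find_imports_in_condition_py imports condition_terms → Spec_find_imports_in_condition_py imports condition_terms (find_imports_in_condition_py imports condition_terms)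

-- ===== LEMMAS AND PROOFS =====

-- A's inner break-loop is an existential over the terms
theorem pvUsesA_iff (imp : String) (ts : List String) :
    pvUsesA imp ts = true ↔ ∃ t ∈ ts, PySem.Str.startswith t (imp ++ ".") = true := by
  induction ts with
  | nil => simp [pvUsesA]
  | cons t ts ih =>
      simp only [pvUsesA]
      split_ifs with h
      · exact iff_of_true rfl ⟨t, List.mem_cons_self, h⟩
      · rw [ih]
        constructor
        · rintro ⟨u, hu, h'⟩
          exact ⟨u, List.mem_cons_of_mem t hu, h'⟩
        · rintro ⟨u, hu, h'⟩
          rcases List.mem_cons.mp hu with rfl | hu'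
          · exact absurd h' h
          · exact ⟨u, hu', h'⟩

-- membership in the dot-prefix list of one term
theorem mem_pvDotPrefixesGo (full : List Char) (imp : String) :
    ∀ (i : Nat) (rest : List Char), full.drop i = rest →
      (imp ∈ pvDotPrefixesGo full i rest ↔
        ∃ j, i ≤ j ∧ j < full.length ∧ full[j]? = some '.' ∧ imp = String.ofList (full.take j)) := by
  intro i rest
  induction rest generalizing i with
  | nil =>
      intro h
      simp only [pvDotPrefixesGo, List.not_mem_nil, false_iff]
      rintro ⟨j, hij, hj, -, -⟩
      have : full.length ≤ i := by
        by_contra hlt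
        push_neg at hlt
        have := List.drop_eq_nil_iff.mp h
        omega
      omega
  | cons c cs ih =>
      intro h
      have hi : i < full.length := by
        by_contra hge
        push_neg at hge
        have : full.drop i = [] := List.drop_eq_nil_iff.mpr hge
        simp [this] at h
      have hci : full[i]? = some c := by
        have h0 : (full.drop i)[0]? = some c := by rw [h]; rfl
        rw [List.getElem?_drop] at h0
        simpa using h0
      have hdrop : full.drop (i + 1) = cs := by
        have h1 : List.drop 1 (List.drop i full) = cs := by rw [h]; rfl
        rwa [List.drop_drop] at h1
      simp only [pvDotPrefixesGo, List.mem_append]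
      rw [ih (i + 1) hdrop]
      constructor
      · rintro (hc | ⟨j, hij, hj, hd, he⟩)
        · split_ifs at hc with hcdot
          · simp at hc
            exact ⟨i, le_refl i, hi, by simp [hci, hcdot], hc⟩
          · simp at hc
        · exact ⟨j, by omega, hj, hd, he⟩
      · rintro ⟨j, hij, hj, hd, he⟩
        by_cases hji : j = i
        · subst hji
          left
          have : c = '.' := by rw [hci] at hd; simpa using hd
          simp [this, he]
        · right
          exact ⟨j, by omega, hj, hd, he⟩

-- startswith (imp ++ ".") characterised by a '.' position after a copy of imp
theorem startswith_dot_iff (t imp : String) :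
    PySem.Str.startswith t (imp ++ ".") = true ↔
      ∃ j, j < t.toList.length ∧ t.toList[j]? = some '.' ∧ imp = String.ofList (t.toList.take j) := by
  rw [PySem.Str.startswith_eq, PySem.Chars.startswith_iff]
  have htl : (imp ++ ".").toList = imp.toList ++ ['.'] := by simp
  rw [htl]
  constructor
  · rintro ⟨u, hu⟩
    have hu' : imp.toList ++ ('.' :: u) = t.toList := by simpa using hu
    refine ⟨imp.toList.length, ?_, ?_, ?_⟩
    · rw [← hu']; simp
    · rw [← hu', List.getElem?_append_right (le_refl _)]; simp
    · rw [← hu', List.take_append_of_le_length (le_refl _), List.take_length]; simp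
  · rintro ⟨j, hj, hd, he⟩
    have hel : imp.toList = t.toList.take j := by rw [he]; simp
    have htake : t.toList.take (j + 1) = imp.toList ++ ['.'] := by
      rw [List.take_succ, ← hel, hd]
      simp
    rw [← htake]
    exact List.take_prefix _ _

-- membership in the accumulated prefix set
theorem mem_pvPrefixSet_aux (imp : String) (ts : List String) :
    ∀ s : PySem.Set String,
      (imp ∈ ts.foldl (fun s t => PySem.Set.update s (pvDotPrefixes t)) s ↔
        imp ∈ s ∨ ∃ t ∈ ts, imp ∈ pvDotPrefixes t) := by
  induction ts with
  | nil => intro s; simp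
  | cons t ts ih =>
      intro s
      simp only [List.foldl_cons]
      rw [ih]
      rw [PySem.Set.mem_update]
      constructor
      · rintro (⟨h | h⟩ | ⟨u, hu, h⟩)
        · exact Or.inl h
        · exact Or.inr ⟨t, by simp, h⟩
        · exact Or.inr ⟨u, by simp [hu], h⟩
      · rintro (h | ⟨u, hu, h⟩)
        · exact Or.inl (Or.inl h)
        · rcases List.mem_cons.mp hu with h' | h'
          · subst h'; exact Or.inl (Or.inr h)
          · exact Or.inr ⟨u, h', h⟩

-- the two per-import tests agree
theorem tests_agree (imp : String) (condition_terms : List String) :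
    pvUsesA imp condition_terms = PySem.Set.contains (pvPrefixSet condition_terms) imp := by
  have hb : PySem.Set.contains (pvPrefixSet condition_terms) imp = true ↔
      ∃ t ∈ condition_terms, imp ∈ pvDotPrefixes t := by
    rw [PySem.Set.contains_iff, pvPrefixSet, mem_pvPrefixSet_aux]
    simp [PySem.Set.empty]
  have ha : pvUsesA imp condition_terms = true ↔
      ∃ t ∈ condition_terms, imp ∈ pvDotPrefixes t := by
    rw [pvUsesA_iff]
    constructor
    · rintro ⟨t, ht, hs⟩
      rcases (startswith_dot_iff t imp).mp hs with ⟨j, hj, hd, he⟩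
      refine ⟨t, ht, ?_⟩
      rw [pvDotPrefixes, mem_pvDotPrefixesGo t.toList imp 0 t.toList (by simp)]
      exact ⟨j, Nat.zero_le _, hj, hd, he⟩
    · rintro ⟨t, ht, hm⟩
      rw [pvDotPrefixes, mem_pvDotPrefixesGo t.toList imp 0 t.toList (by simp)] at hm
      rcases hm with ⟨j, -, hj, hd, he⟩
      exact ⟨t, ht, (startswith_dot_iff t imp).mpr ⟨j, hj, hd, he⟩⟩
  cases hA : pvUsesA imp condition_terms with
  | false =>
      cases hB : PySem.Set.contains (pvPrefixSet condition_terms) imp with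
      | false => rfl
      | true => exact absurd (ha.mpr (hb.mp hB)) (by rw [hA]; exact Bool.false_ne_true)
  | true => exact (hb.mpr (ha.mp hA)).symm

theorem fold_agree (imports : List String) (condition_terms : List String) :
    ∀ used : PySem.Set String,
      imports.foldl (fun used imp => if pvUsesA imp condition_terms then PySem.Set.add used imp else used) used =
      imports.foldl (fun used imp => if PySem.Set.contains (pvPrefixSet condition_terms) imp then PySem.Set.add used imp else used) used := by
  intro used
  simp only [tests_agree]

-- ===== VERDICT (by name: the statement is the Claim_ definition above) =====
theorem find_imports_in_condition_py_spec : Claim_equal_find_imports_in_condition_py := by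
  intro imports condition_terms _
  unfold Spec_find_imports_in_condition_py find_imports_in_condition_py find_imports_in_condition_py_alt
  exact fold_agree imports condition_terms PySem.Set.empty
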